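-- pv_equiv track=rewrite | github.com/djnoltom/fastapi-on-azure-functions | billing_app/services/aba_notes_engine/exporters.py | _parse_key_values
-- ===== SOURCE A (Python) =====
-- def _parse_key_values(lines: list[str], start: int, stop_markers: set[str]) -> tuple[dict[str, str], int]:
--     data: dict[str, str] = {}
--     index = start
--     while index < len(lines):
--         line = lines[index].strip()
--         if not line:
--             index += 1
--             continue
--         if line in stop_markers:
--             break
--         if ":" in line:
--             key, value = line.split(":", 1)
--             data[key.strip()] = value.strip()
--         index += 1
--     return data, index
-- ===== SOURCE B (Python) =====
-- def _parse_key_values(lines: list[str], start: int, stop_markers: set[str]) -> tuple[dict[str, str], int]: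
--     # Pass 1: stripped view of the positions the scan visits (Python indexing,
--     # so negative start wraps), cut at the first non-blank stop marker.
--     stripped = [lines[p].strip() for p in range(start, len(lines))]
--     cut = next((i for i, s in enumerate(stripped) if s and s in stop_markers),
--                len(stripped))
--     # Pass 2: parse key/value pairs from the region before the cut.
--     data: dict[str, str] = {}
--     for s in stripped[:cut]:
--         if ":" in s:
--             key, value = s.split(":", 1)
--             data[key.strip()] = value.strip()
--     return data, start + cut
-- ===== Notes on version B (the rewrite author's own statement) =====
-- stated objective: alternative
-- what changed: A's single interleaved while-loop (index bookkeeping, blank-skip, marker-break and dict build in one body) becomes three separate passes: strip the lines at every position the scan visits, find the cut point via next/enumerate, then parse the region before the cut; the returned index is start + cut.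
import Mathlib
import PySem

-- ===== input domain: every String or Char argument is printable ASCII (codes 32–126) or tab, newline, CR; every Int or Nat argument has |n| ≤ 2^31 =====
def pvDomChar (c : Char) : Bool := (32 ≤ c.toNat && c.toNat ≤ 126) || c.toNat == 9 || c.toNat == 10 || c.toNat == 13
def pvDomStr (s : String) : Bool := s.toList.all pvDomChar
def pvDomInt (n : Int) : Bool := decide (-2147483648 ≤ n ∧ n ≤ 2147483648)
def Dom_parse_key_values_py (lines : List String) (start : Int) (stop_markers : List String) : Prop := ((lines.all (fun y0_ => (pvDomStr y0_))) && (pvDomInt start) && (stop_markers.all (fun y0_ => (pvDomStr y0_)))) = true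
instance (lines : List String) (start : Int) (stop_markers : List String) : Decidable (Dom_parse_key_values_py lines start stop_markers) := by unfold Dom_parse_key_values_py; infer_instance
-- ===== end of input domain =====

-- B replaces A's single interleaved while-loop by three passes (strip the visited positions,
-- find the cut at the first non-blank stop marker, parse the region before the cut);
-- objective: alternative decomposition, same cost. Where A raises IndexError (start < -len(lines)),
-- B raises too; Pre_ excludes exactly those inputs.


-- ===== PORT A =====
-- A's while-loop: index walks from start; lines[index] is PySem.List.pyGet? (negative indices wrap;
-- none = IndexError, excluded by Pre_ — the port then returns the state reached, a value never claimed about).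
def parse_key_values_aux (lines : List String) (stop_markers : List String) :
    Nat → PySem.Dict String String → Int → PySem.Dict String String × Int
  | 0, data, index => (data, index)
  | fuel + 1, data, index =>
    if index < (lines.length : Int) then
      match PySem.List.pyGet? lines index with
      | none => (data, index)  -- Python raises IndexError here (outside Pre_)
      | some l =>
        let line := PySem.Str.strip l
        if line = "" then
          parse_key_values_aux lines stop_markers fuel data (index + 1)
        else if stop_markers.contains line then
          (data, index)
        else
          let data' :=
            if PySem.Str.isIn ":" line then
              match PySem.Str.splitMax? line ":" 1 with
              | some (k :: v :: _) =>
                  data.insert (PySem.Str.strip k) (PySem.Str.strip v)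
              | _ => data
            else data
          parse_key_values_aux lines stop_markers fuel data' (index + 1)
    else (data, index)

def parse_key_values_py (lines : List String) (start : Int) (stop_markers : List String) : (List (String × String)) × Int :=
  let r := parse_key_values_aux lines stop_markers ((lines.length : Int) - start).toNat PySem.Dict.empty start
  (r.1.items, r.2)

-- ===== PORT B =====
-- B's cut predicate: a stripped line is a non-blank stop marker.
def pvIsStop (stop_markers : List String) (s : String) : Bool :=
  !(s == "") && stop_markers.contains s

-- B's pass-2 body: parse one (already stripped) region line into the dict.
def pvParseLine (data : PySem.Dict String String) (s : String) : PySem.Dict String String :=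
  if PySem.Str.isIn ":" s then
    match PySem.Str.splitMax? s ":" 1 with
    | some (k :: v :: _) => data.insert (PySem.Str.strip k) (PySem.Str.strip v)
    | _ => data
  else data

def parse_key_values_py_alt (lines : List String) (start : Int) (stop_markers : List String) : (List (String × String)) × Int :=
  -- Pass 1: stripped view of the visited positions (getD "" stands for lines[p],
  -- exact wherever Python does not raise, i.e. on Pre_).
  let stripped := (PySem.List.pyRange start (lines.length : Int) 1).map
      (fun p => PySem.Str.strip ((PySem.List.pyGet? lines p).getD ""))
  let cut := stripped.findIdx (pvIsStop stop_markers)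
  -- Pass 2: parse the region before the cut.
  let data := (stripped.take cut).foldl pvParseLine PySem.Dict.empty
  (data.items, start + (cut : Int))

-- ===== PRECONDITION & SPEC =====
-- Pre_ excludes exactly the inputs where A (and B) raise IndexError: start < -len(lines).
def Pre_parse_key_values_py (lines : List String) (start : Int) (stop_markers : List String) : Prop :=
  -(lines.length : Int) ≤ start
instance (lines : List String) (start : Int) (stop_markers : List String) : Decidable (Pre_parse_key_values_py lines start stop_markers) := by unfold Pre_parse_key_values_py; infer_instance
def pvWitness_parse_key_values_py : List String × Int × List String := (["a: 1", "STOP"], 0, ["STOP"])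

def Spec_parse_key_values_py (lines : List String) (start : Int) (stop_markers : List String) (out : (List (String × String)) × Int) : Prop := out = parse_key_values_py_alt lines start stop_markers
instance (lines : List String) (start : Int) (stop_markers : List String) (out : (List (String × String)) × Int) : Decidable (Spec_parse_key_values_py lines start stop_markers out) := by unfold Spec_parse_key_values_py; infer_instance

-- ===== CLAIM =====
def Claim_equal_parse_key_values_py : Prop := ∀ (lines : List String) (start : Int) (stop_markers : List String), Dom_parse_key_values_py lines start stop_markers → Pre_parse_key_values_py lines start stop_markers → Spec_parse_key_values_py lines start stop_markers (parse_key_values_py lines start stop_markers)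

-- ===== LEMMAS AND PROOFS =====

theorem pvParseLine_empty (d : PySem.Dict String String) : pvParseLine d "" = d := by
  rw [pvParseLine, if_neg (by decide : ¬ PySem.Str.isIn ":" "" = true)]

-- A's loop with enough fuel, started at any in-range index i, computes B's passes on the
-- positions from i on.
theorem aux_eq (lines stop_markers : List String) (fuel : Nat)
    (d : PySem.Dict String String) (i : Int)
    (h1 : -(lines.length : Int) ≤ i) (hf : (lines.length : Int) ≤ i + fuel) :
    parse_key_values_aux lines stop_markers fuel d i =
      (let stripped := (PySem.List.pyRange i (lines.length : Int) 1).map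
          (fun p => PySem.Str.strip ((PySem.List.pyGet? lines p).getD ""))
       let cut := stripped.findIdx (pvIsStop stop_markers)
       ((stripped.take cut).foldl pvParseLine d, i + (cut : Int))) := by
  induction fuel generalizing i d with
  | zero =>
    have h0 : ((lines.length : Int) - i).toNat = 0 := by omega
    simp [parse_key_values_aux, PySem.List.pyRange_one, h0]
  | succ fuel ih =>
    by_cases hlt : i < (lines.length : Int)
    · have hcons := PySem.List.pyRange_one_cons (a := i) (b := (lines.length : Int)) hlt
      have hrange : PySem.Raise.InRange lines.length i := ⟨h1, hlt⟩
      cases hget : PySem.List.pyGet? lines i with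
      | none =>
        exact absurd hrange ((PySem.List.pyGet?_eq_none_iff lines i).mp hget)
      | some l =>
        rw [parse_key_values_aux, if_pos hlt, hget]
        dsimp only
        rw [hcons]
        simp only [List.map_cons, hget, Option.getD_some]
        by_cases hs : PySem.Str.strip l = ""
        · have hstop : pvIsStop stop_markers "" = false := by simp [pvIsStop]
          rw [if_pos hs, hs, ih d (i + 1) (by omega) (by omega)]
          simp only [List.findIdx_cons, hstop, cond_false, List.take_succ_cons,
            List.foldl_cons, pvParseLine_empty, Prod.mk.injEq]
          exact ⟨trivial, by push_cast; ring⟩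
        · by_cases hm : stop_markers.contains (PySem.Str.strip l) = true
          · have hstop : pvIsStop stop_markers (PySem.Str.strip l) = true := by
              simp [pvIsStop, hs]
              exact List.mem_of_elem_eq_true hm
            rw [if_neg hs, if_pos hm]
            simp [List.findIdx_cons, hstop]
          · have hstop : pvIsStop stop_markers (PySem.Str.strip l) = false := by
              simp [pvIsStop]
              intro _ hmem
              exact hm (List.elem_eq_true_of_mem hmem)
            rw [if_neg hs, if_neg hm]
            have hstep :
                (if PySem.Str.isIn ":" (PySem.Str.strip l) then
                  match PySem.Str.splitMax? (PySem.Str.strip l) ":" 1 with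
                  | some (k :: v :: _) =>
                      d.insert (PySem.Str.strip k) (PySem.Str.strip v)
                  | _ => d
                else d) = pvParseLine d (PySem.Str.strip l) := rfl
            rw [hstep, ih (pvParseLine d (PySem.Str.strip l)) (i + 1) (by omega)
              (by omega)]
            simp only [List.findIdx_cons, hstop, cond_false, List.take_succ_cons,
              List.foldl_cons, Prod.mk.injEq]
            exact ⟨trivial, by push_cast; ring⟩
    · have h0 : ((lines.length : Int) - i).toNat = 0 := by omega
      rw [parse_key_values_aux, if_neg hlt]
      simp [PySem.List.pyRange_one, h0]

-- ===== VERDICT =====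
theorem parse_key_values_py_spec : Claim_equal_parse_key_values_py := by
  intro lines start stop_markers _ hpre
  unfold Spec_parse_key_values_py
  unfold Pre_parse_key_values_py at hpre
  unfold parse_key_values_py parse_key_values_py_alt
  dsimp only
  rw [aux_eq lines stop_markers (((lines.length : Int) - start).toNat)
    PySem.Dict.empty start hpre (by omega)]
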